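-- pv_equiv track=rewrite | github.com/JayConnorSynrg/n8n-workflows | src/tools/composio_router.py | _parse_slug
-- ===== SOURCE A (Python) =====
-- _SERVICE_DISPLAY_MAP: dict[str, tuple[str, str]] = {
--     "MICROSOFT_TEAMS_": ("Teams", "in Teams"),
--     "MICROSOFTTEAMS_": ("Teams", "in Teams"),
--     "TEAMS_": ("Teams", "in Teams"),
--     "ONE_DRIVE_": ("OneDrive", "on OneDrive"),
--     "ONEDRIVE_": ("OneDrive", "on OneDrive"),
--     "GOOGLE_SHEETS_": ("Sheets", "in Sheets"),
--     "GOOGLESHEETS_": ("Sheets", "in Sheets"),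
--     "GOOGLE_DOCS_": ("Docs", "in Docs"),
--     "GOOGLEDOCS_": ("Docs", "in Docs"),
--     "GOOGLECALENDAR_": ("Calendar", "on Calendar"),
--     "GOOGLE_CALENDAR_": ("Calendar", "on Calendar"),
--     "GOOGLEDRIVE_": ("Drive", "on Drive"),
--     "GOOGLE_DRIVE_": ("Drive", "on Drive"),
--     "EXCEL_": ("Excel", "in Excel"),
--     "SLACK_": ("Slack", "in Slack"),
--     "GMAIL_": ("Gmail", "via email"),
--     "GITHUB_": ("GitHub", "on GitHub"),
--     "CANVA_": ("Canva", "in Canva"),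
--     "APIFY_": ("Apify", ""),
--     "FIRECRAWL_": ("Firecrawl", ""),
--     "SUPABASE_": ("Database", "in the database"),
--     "PINECONE_": ("Search", "in search index"),
--     "RECALLAI_": ("Recall", "via Recall"),
--     "PERPLEXITYAI_": ("Search", "via search"),
--     "GAMMA_": ("Gamma", "in Gamma"),
--     "COMPOSIO_SEARCH_": ("Web Search", ""),
--     "COMPOSIO_": ("Tools", ""),
-- }
--
-- def _parse_slug(tool_slug: str) -> tuple[str, str]:
--     """Parse a slug into (service_label, action_text).
--
--     Returns ("Teams", "Send Message") for MICROSOFT_TEAMS_SEND_MESSAGE.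
--     Falls back to ("Tools", "action name") for unknown prefixes.
--     """
--     slug = tool_slug.upper()
--     for prefix, (label, _) in _SERVICE_DISPLAY_MAP.items():
--         if slug.startswith(prefix):
--             action = slug[len(prefix):].replace("_", " ").title()
--             return label, action
--     # Unknown service — use first word as label, rest as action
--     parts = slug.split("_", 1)
--     if len(parts) == 2:
--         return parts[0].title(), parts[1].replace("_", " ").title()
--     return "Tools", slug.replace("_", " ").title()
-- ===== SOURCE B (Python) =====
-- # B: tokenize once on "_" and resolve the service by dict lookup of the first
-- # one or two tokens (two-token services first), instead of scanning a prefix table.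
-- _TWO_TOKEN_LABELS: dict[tuple[str, str], str] = {
--     ("MICROSOFT", "TEAMS"): "Teams",
--     ("ONE", "DRIVE"): "OneDrive",
--     ("GOOGLE", "SHEETS"): "Sheets",
--     ("GOOGLE", "DOCS"): "Docs",
--     ("GOOGLE", "CALENDAR"): "Calendar",
--     ("GOOGLE", "DRIVE"): "Drive",
--     ("COMPOSIO", "SEARCH"): "Web Search",
-- }
--
-- _ONE_TOKEN_LABELS: dict[str, str] = {
--     "MICROSOFTTEAMS": "Teams",
--     "TEAMS": "Teams",
--     "ONEDRIVE": "OneDrive",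
--     "GOOGLESHEETS": "Sheets",
--     "GOOGLEDOCS": "Docs",
--     "GOOGLECALENDAR": "Calendar",
--     "GOOGLEDRIVE": "Drive",
--     "EXCEL": "Excel",
--     "SLACK": "Slack",
--     "GMAIL": "Gmail",
--     "GITHUB": "GitHub",
--     "CANVA": "Canva",
--     "APIFY": "Apify",
--     "FIRECRAWL": "Firecrawl",
--     "SUPABASE": "Database",
--     "PINECONE": "Search",
--     "RECALLAI": "Recall",
--     "PERPLEXITYAI": "Search",
--     "GAMMA": "Gamma",
--     "COMPOSIO": "Tools",
-- }
--
-- def _parse_slug(tool_slug: str) -> tuple[str, str]: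
--     """Token-based service resolution: split once, look the head tokens up."""
--     parts = tool_slug.upper().split("_")
--     if len(parts) > 2:
--         label = _TWO_TOKEN_LABELS.get((parts[0], parts[1]))
--         if label is not None:
--             return label, " ".join(parts[2:]).title()
--     if len(parts) > 1:
--         label = _ONE_TOKEN_LABELS.get(parts[0])
--         if label is not None:
--             return label, " ".join(parts[1:]).title()
--         return parts[0].title(), " ".join(parts[1:]).title()
--     return "Tools", parts[0].title()
-- ===== Notes on version B (the rewrite author's own statement) =====
-- stated objective: alternative
-- what changed: B replaces A's ordered scan of 27 string prefixes (startswith on each, table order encoding tie-breaks) by splitting the slug once on the underscore separator and resolving the service with two dict lookups keyed by the first one or two tokens (two-token services tried first); equal because every table prefix ends in the separator so prefix matching aligns with token boundaries, and the only nested prefix pair (COMPOSIO_SEARCH_/COMPOSIO_) is listed longer-first in A.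
import Mathlib
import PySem

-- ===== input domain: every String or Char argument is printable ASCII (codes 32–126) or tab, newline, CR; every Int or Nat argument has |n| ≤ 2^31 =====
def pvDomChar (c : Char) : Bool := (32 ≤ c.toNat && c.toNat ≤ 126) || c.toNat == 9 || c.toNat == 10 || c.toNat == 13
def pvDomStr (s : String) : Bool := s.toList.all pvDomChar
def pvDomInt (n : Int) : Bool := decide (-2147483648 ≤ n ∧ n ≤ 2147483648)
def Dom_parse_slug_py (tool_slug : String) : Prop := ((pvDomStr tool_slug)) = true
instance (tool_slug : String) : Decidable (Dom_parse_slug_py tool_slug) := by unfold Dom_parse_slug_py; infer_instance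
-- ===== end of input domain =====

-- B replaces A's ordered scan over 27 string prefixes by one split on '_' and
-- two dict lookups keyed by the first one or two tokens (objective: alternative).

-- ===== PORT A =====
-- the module constant _SERVICE_DISPLAY_MAP : dict[str, tuple[str, str]] in insertion order
def serviceDisplayMap : List (String × String × String) :=
  [("MICROSOFT_TEAMS_", "Teams", "in Teams"),
   ("MICROSOFTTEAMS_", "Teams", "in Teams"),
   ("TEAMS_", "Teams", "in Teams"),
   ("ONE_DRIVE_", "OneDrive", "on OneDrive"),
   ("ONEDRIVE_", "OneDrive", "on OneDrive"),
   ("GOOGLE_SHEETS_", "Sheets", "in Sheets"),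
   ("GOOGLESHEETS_", "Sheets", "in Sheets"),
   ("GOOGLE_DOCS_", "Docs", "in Docs"),
   ("GOOGLEDOCS_", "Docs", "in Docs"),
   ("GOOGLECALENDAR_", "Calendar", "on Calendar"),
   ("GOOGLE_CALENDAR_", "Calendar", "on Calendar"),
   ("GOOGLEDRIVE_", "Drive", "on Drive"),
   ("GOOGLE_DRIVE_", "Drive", "on Drive"),
   ("EXCEL_", "Excel", "in Excel"),
   ("SLACK_", "Slack", "in Slack"),
   ("GMAIL_", "Gmail", "via email"),
   ("GITHUB_", "GitHub", "on GitHub"),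
   ("CANVA_", "Canva", "in Canva"),
   ("APIFY_", "Apify", ""),
   ("FIRECRAWL_", "Firecrawl", ""),
   ("SUPABASE_", "Database", "in the database"),
   ("PINECONE_", "Search", "in search index"),
   ("RECALLAI_", "Recall", "via Recall"),
   ("PERPLEXITYAI_", "Search", "via search"),
   ("GAMMA_", "Gamma", "in Gamma"),
   ("COMPOSIO_SEARCH_", "Web Search", ""),
   ("COMPOSIO_", "Tools", "")]

-- str.title() ported by hand (PySem has no title): exact on the ASCII domain,
-- where a character is cased iff it is a letter — a letter is upper-cased after
-- a non-letter and lower-cased after a letter.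
def pyTitle : Bool → List Char → List Char
  | _, [] => []
  | prevAlpha, c :: cs =>
      (if PySem.Chars.isalpha c then
        (if prevAlpha then PySem.Chars.lowerChar c else PySem.Chars.upperChar c)
       else c) :: pyTitle (PySem.Chars.isalpha c) cs

-- slug[len(prefix):].replace("_", " ").title()   (len(prefix) ≥ 0, so the slice is List.drop)
def mkAction (slug : List Char) (p : String) : String :=
  String.ofList (pyTitle false (PySem.Chars.replace (slug.drop p.toList.length) ['_'] [' ']))

-- the unknown-prefix fallback:
-- parts = slug.split("_", 1); two parts → (parts[0].title(), parts[1].replace("_"," ").title()); else ("Tools", …)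
def slugFallback (slug : List Char) : String × String :=
  match PySem.Chars.splitOnMax slug ['_'] 1 with
  | [w1, w2] => (String.ofList (pyTitle false w1),
                 String.ofList (pyTitle false (PySem.Chars.replace w2 ['_'] [' '])))
  | _ => ("Tools", String.ofList (pyTitle false (PySem.Chars.replace slug ['_'] [' '])))

-- A's loop: return at the FIRST prefix of the table that matches
def goA (slug : List Char) : List (String × String × String) → String × String
  | [] => slugFallback slug
  | (p, label, _) :: rest =>
      if PySem.Chars.startswith slug p.toList then (label, mkAction slug p)
      else goA slug rest

def parse_slug_py (tool_slug : String) : String × String :=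
  goA (PySem.Chars.upper tool_slug.toList) serviceDisplayMap

-- ===== PORT B =====
-- _TWO_TOKEN_LABELS : dict keyed by the first two '_'-tokens of the slug
def twoTokenLabels : PySem.Dict (List Char × List Char) String :=
  PySem.Dict.mk
    [(("MICROSOFT".toList, "TEAMS".toList), "Teams"),
     (("ONE".toList, "DRIVE".toList), "OneDrive"),
     (("GOOGLE".toList, "SHEETS".toList), "Sheets"),
     (("GOOGLE".toList, "DOCS".toList), "Docs"),
     (("GOOGLE".toList, "CALENDAR".toList), "Calendar"),
     (("GOOGLE".toList, "DRIVE".toList), "Drive"),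
     (("COMPOSIO".toList, "SEARCH".toList), "Web Search")]

-- _ONE_TOKEN_LABELS : dict keyed by the first '_'-token of the slug
def oneTokenLabels : PySem.Dict (List Char) String :=
  PySem.Dict.mk
    [("MICROSOFTTEAMS".toList, "Teams"),
     ("TEAMS".toList, "Teams"),
     ("ONEDRIVE".toList, "OneDrive"),
     ("GOOGLESHEETS".toList, "Sheets"),
     ("GOOGLEDOCS".toList, "Docs"),
     ("GOOGLECALENDAR".toList, "Calendar"),
     ("GOOGLEDRIVE".toList, "Drive"),
     ("EXCEL".toList, "Excel"),
     ("SLACK".toList, "Slack"),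
     ("GMAIL".toList, "Gmail"),
     ("GITHUB".toList, "GitHub"),
     ("CANVA".toList, "Canva"),
     ("APIFY".toList, "Apify"),
     ("FIRECRAWL".toList, "Firecrawl"),
     ("SUPABASE".toList, "Database"),
     ("PINECONE".toList, "Search"),
     ("RECALLAI".toList, "Recall"),
     ("PERPLEXITYAI".toList, "Search"),
     ("GAMMA".toList, "Gamma"),
     ("COMPOSIO".toList, "Tools")]

-- str.title() for B, written as a left fold carrying (previous-char-is-a-letter, reversed output)
def titleStep (st : Bool × List Char) (c : Char) : Bool × List Char :=
  (PySem.Chars.isalpha c,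
   (if PySem.Chars.isalpha c then
      (if st.1 then PySem.Chars.lowerChar c else PySem.Chars.upperChar c)
    else c) :: st.2)

def titleB (cs : List Char) : List Char :=
  (cs.foldl titleStep (false, [])).2.reverse

-- if len(parts) > 2 and the (parts[0], parts[1]) lookup hits, the first return
def resolve2 (parts : List (List Char)) : Option (String × String) :=
  match parts with
  | p0 :: p1 :: _ :: _ =>
      (PySem.Dict.get? twoTokenLabels (p0, p1)).map
        (fun label => (label, String.ofList (titleB (PySem.Chars.join [' '] (parts.drop 2)))))
  | _ => none

def parse_slug_py_alt (tool_slug : String) : String × String :=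
  let parts := PySem.Chars.splitOn (PySem.Chars.upper tool_slug.toList) ['_']
  match resolve2 parts with
  | some r => r
  | none =>
    match parts with
    | p0 :: _ :: _ =>
        (match PySem.Dict.get? oneTokenLabels p0 with
         | some label => (label, String.ofList (titleB (PySem.Chars.join [' '] (parts.drop 1))))
         | none => (String.ofList (titleB p0),
                    String.ofList (titleB (PySem.Chars.join [' '] (parts.drop 1)))))
    | _ => ("Tools", String.ofList (titleB (parts.headD [])))

-- ===== PRECONDITION & SPEC =====
def Spec_parse_slug_py (tool_slug : String) (out : String × String) : Prop := out = parse_slug_py_alt tool_slug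
instance (tool_slug : String) (out : String × String) : Decidable (Spec_parse_slug_py tool_slug out) := by unfold Spec_parse_slug_py; infer_instance

-- ===== CLAIM (what is proved, stated in full; the proofs are below) =====
def Claim_equal_parse_slug_py : Prop := ∀ (tool_slug : String), Dom_parse_slug_py tool_slug → Spec_parse_slug_py tool_slug (parse_slug_py tool_slug)

-- ===== LEMMAS AND PROOFS =====

def subU (c : Char) : Char := if c = '_' then ' ' else c

def mySplit : List Char → List (List Char)
  | [] => [[]]
  | c :: cs =>
    if c = '_' then [] :: mySplit cs
    else match mySplit cs with
         | p :: ps => (c :: p) :: ps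
         | [] => [[c]]

lemma mySplit_ne_nil (s : List Char) : mySplit s ≠ [] := by
  cases s with
  | nil => simp [mySplit]
  | cons c cs =>
    simp only [mySplit]
    split_ifs
    · simp
    · cases h : mySplit cs <;> simp

def consHead (pre : List Char) : List (List Char) → List (List Char)
  | [] => [pre]
  | p :: ps => (pre ++ p) :: ps

lemma consHead_mySplit (s : List Char) : consHead [] (mySplit s) = mySplit s := by
  cases h : mySplit s with
  | nil => exact absurd h (mySplit_ne_nil s)
  | cons p ps => simp [consHead]

lemma go_spec : ∀ (fuel : Nat) (s cur acc : _), s.length < fuel →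
    PySem.Chars.splitOn.go ['_'] fuel s cur acc = acc.reverse ++ consHead cur.reverse (mySplit s) := by
  intro fuel
  induction fuel with
  | zero => intro s cur acc h; omega
  | succ f ih =>
    intro s cur acc h
    cases s with
    | nil =>
      rw [PySem.Chars.splitOn.go]
      simp [mySplit, consHead]
      omega
    | cons c rest =>
      rw [PySem.Chars.splitOn.go]
      by_cases hc : c = '_'
      · subst hc
        simp only [List.isPrefixOf, beq_self_eq_true, Bool.true_and, if_pos, List.length_cons,
          List.drop_succ_cons, List.length_nil, List.drop_zero]
        rw [ih rest [] (cur.reverse :: acc) (by simpa using Nat.lt_of_succ_lt_succ h)]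
        simp [mySplit, consHead_mySplit]
        cases hr : mySplit rest with
        | nil => exact absurd hr (mySplit_ne_nil rest)
        | cons p ps => simp [consHead]
      · have hbeq : ('_' == c) = false := by simpa using fun hh => hc hh.symm
        simp only [List.isPrefixOf, hbeq, Bool.false_and, if_neg, Bool.false_eq_true,
          not_false_iff]
        rw [ih rest (c :: cur) acc (by simpa using Nat.lt_of_succ_lt_succ h)]
        simp only [mySplit, if_neg hc, List.reverse_cons]
        cases hr : mySplit rest with
        | nil => exact absurd hr (mySplit_ne_nil rest)
        | cons p ps => simp [consHead]

lemma splitOn_eq (s : List Char) : PySem.Chars.splitOn s ['_'] = mySplit s := by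
  rw [PySem.Chars.splitOn, go_spec (s.length + 1) s [] [] (Nat.lt_succ_self _)]
  simp [consHead_mySplit]

lemma mySplit_noU (s : List Char) : ∀ p ∈ mySplit s, '_' ∉ p := by
  induction s with
  | nil => simp [mySplit]
  | cons c cs ih =>
    simp only [mySplit]
    split_ifs with hc
    · intro p hp
      rcases List.mem_cons.mp hp with rfl | hp
      · simp
      · exact ih p hp
    · cases hr : mySplit cs with
      | nil => exact absurd hr (mySplit_ne_nil cs)
      | cons q qs =>
        intro p hp
        rcases List.mem_cons.mp hp with rfl | hp
        · intro hm
          rcases List.mem_cons.mp hm with rfl | hm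
          · exact hc rfl
          · exact ih q (hr ▸ List.mem_cons_self ..) hm
        · exact ih p (hr ▸ List.mem_cons_of_mem _ hp)

lemma join_mySplit (s : List Char) : PySem.Chars.join ['_'] (mySplit s) = s := by
  induction s with
  | nil => simp [mySplit, PySem.Chars.join, List.intercalate]
  | cons c cs ih =>
    simp only [mySplit]
    split_ifs with hc
    · subst hc
      cases hr : mySplit cs with
      | nil => exact absurd hr (mySplit_ne_nil cs)
      | cons q qs =>
        rw [hr] at ih
        rw [PySem.Chars.join_cons_cons]
        simpa using ih
    · cases hr : mySplit cs with
      | nil => exact absurd hr (mySplit_ne_nil cs)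
      | cons q qs =>
        rw [hr] at ih
        cases qs with
        | nil => simpa [PySem.Chars.join_singleton] using ih
        | cons q2 qs2 =>
          rw [PySem.Chars.join_cons_cons] at ih ⊢
          simpa using ih

lemma mySplit_token (t r : List Char) (ht : '_' ∉ t) :
    mySplit (t ++ '_' :: r) = t :: mySplit r := by
  induction t with
  | nil => simp [mySplit]
  | cons c t ih =>
    have hc : c ≠ '_' := fun h => ht (h ▸ List.mem_cons_self ..)
    simp only [List.cons_append, mySplit, if_neg hc,
      ih (fun h => ht (List.mem_cons_of_mem _ h))]

lemma mySplit_noU_eq (s : List Char) (hs : '_' ∉ s) : mySplit s = [s] := by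
  induction s with
  | nil => simp [mySplit]
  | cons c cs ih =>
    have hc : c ≠ '_' := fun h => hs (h ▸ List.mem_cons_self ..)
    simp only [mySplit, if_neg hc, ih (fun h => hs (List.mem_cons_of_mem _ h))]


lemma mySplit_join (ps : List (List Char)) (hps : ∀ p ∈ ps, '_' ∉ p) (hne : ps ≠ []) :
    mySplit (PySem.Chars.join ['_'] ps) = ps := by
  induction ps with
  | nil => exact absurd rfl hne
  | cons p qs ih =>
    cases qs with
    | nil =>
      rw [PySem.Chars.join_singleton]
      exact mySplit_noU_eq p (hps p (List.mem_cons_self ..))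
    | cons q qs' =>
      rw [PySem.Chars.join_cons_cons, List.append_assoc, List.singleton_append,
        mySplit_token p _ (hps p (List.mem_cons_self ..)),
        ih (fun x hx => hps x (List.mem_cons_of_mem _ hx)) (by simp)]

-- startswith over the joined token list, one leading token
lemma sw_one (t : List Char) (ht : '_' ∉ t) (ps : List (List Char))
    (hps : ∀ p ∈ ps, '_' ∉ p) (hne : ps ≠ []) :
    PySem.Chars.startswith (PySem.Chars.join ['_'] ps) (t ++ ['_']) = true ↔
      ∃ qs, ps = t :: qs ∧ qs ≠ [] := by
  rw [PySem.Chars.startswith_iff]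
  constructor
  · rintro ⟨r, hr⟩
    have hj : PySem.Chars.join ['_'] ps = t ++ '_' :: r := by simpa using hr.symm
    have hms := mySplit_join ps hps hne
    rw [hj, mySplit_token t r ht] at hms
    exact ⟨mySplit r, hms.symm, mySplit_ne_nil r⟩
  · rintro ⟨qs, rfl, hqs⟩
    cases qs with
    | nil => exact absurd rfl hqs
    | cons q qs' =>
      rw [PySem.Chars.join_cons_cons]
      exact ⟨PySem.Chars.join ['_'] (q :: qs'), by simp⟩

-- startswith over the joined token list, two leading tokens
lemma sw_two (t u : List Char) (ht : '_' ∉ t) (hu : '_' ∉ u) (ps : List (List Char))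
    (hps : ∀ p ∈ ps, '_' ∉ p) (hne : ps ≠ []) :
    PySem.Chars.startswith (PySem.Chars.join ['_'] ps) (t ++ '_' :: (u ++ ['_'])) = true ↔
      ∃ qs, ps = t :: u :: qs ∧ qs ≠ [] := by
  rw [PySem.Chars.startswith_iff]
  constructor
  · rintro ⟨r, hr⟩
    have hj : PySem.Chars.join ['_'] ps = t ++ '_' :: (u ++ '_' :: r) := by
      rw [← hr]; simp
    have hms := mySplit_join ps hps hne
    rw [hj, mySplit_token t _ ht, mySplit_token u r hu] at hms
    exact ⟨mySplit r, hms.symm, mySplit_ne_nil r⟩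
  · rintro ⟨qs, rfl, hqs⟩
    cases qs with
    | nil => exact absurd rfl hqs
    | cons q qs' =>
      rw [PySem.Chars.join_cons_cons, PySem.Chars.join_cons_cons]
      refine ⟨PySem.Chars.join ['_'] (q :: qs'), by simp⟩

-- split("_", 1): go with budget 0 dumps the rest
lemma goM_zero : ∀ (fuel : Nat) (l cur acc : _),
    PySem.Chars.splitOnMax.go ['_'] fuel 0 l cur acc = acc.reverse ++ [cur.reverse ++ l] := by
  intro fuel l cur acc
  cases fuel with
  | zero => rw [PySem.Chars.splitOnMax.go]; simp
  | succ f =>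
    cases l with
    | nil =>
      rw [PySem.Chars.splitOnMax.go]
      simp
      omega
    | cons c rest => rw [PySem.Chars.splitOnMax.go]; simp

lemma goM_one : ∀ (fuel : Nat) (l cur acc : _), l.length < fuel →
    PySem.Chars.splitOnMax.go ['_'] fuel 1 l cur acc =
      acc.reverse ++ (match mySplit l with
        | [] => []
        | p :: ps => if ps.isEmpty then [cur.reverse ++ p]
                     else [cur.reverse ++ p, PySem.Chars.join ['_'] ps]) := by
  intro fuel
  induction fuel with
  | zero => intro l cur acc h; omega
  | succ f ih =>
    intro l cur acc h
    cases l with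
    | nil =>
      rw [PySem.Chars.splitOnMax.go]
      simp [mySplit]
      omega
    | cons c rest =>
      rw [PySem.Chars.splitOnMax.go]
      by_cases hc : c = '_'
      · subst hc
        simp only [List.isPrefixOf, beq_self_eq_true, Bool.true_and, if_pos, if_neg,
          one_ne_zero, not_false_iff, List.length_cons, List.length_nil, List.drop_succ_cons,
          List.drop_zero]
        rw [goM_zero]
        cases hr : mySplit rest with
        | nil => exact absurd hr (mySplit_ne_nil rest)
        | cons p ps =>
          have hj := join_mySplit rest
          rw [hr] at hj
          simp [mySplit, hr, hj]
      · have hbeq : ('_' == c) = false := by simpa using fun hh => hc hh.symm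
        simp only [List.isPrefixOf, hbeq, Bool.false_and, if_neg, one_ne_zero, not_false_iff,
          Bool.false_eq_true]
        rw [ih rest (c :: cur) acc (by simpa using Nat.lt_of_succ_lt_succ h)]
        simp only [mySplit, if_neg hc]
        cases hr : mySplit rest with
        | nil => exact absurd hr (mySplit_ne_nil rest)
        | cons p ps => cases ps <;> simp

lemma splitOnMax_one (s : List Char) :
    PySem.Chars.splitOnMax s ['_'] 1 =
      (match mySplit s with
        | [] => []
        | p :: ps => if ps.isEmpty then [p] else [p, PySem.Chars.join ['_'] ps]) := by
  rw [PySem.Chars.splitOnMax]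
  simp only [if_neg (by omega : ¬ (1:Int) < 0)]
  rw [show ((1:Int).toNat) = 1 from rfl, goM_one (s.length + 1) s [] [] (Nat.lt_succ_self _)]
  cases hr : mySplit s with
  | nil => simp
  | cons p ps => cases ps <;> simp

-- replace("_", " ") is a character map
lemma goR_spec : ∀ (fuel : Nat) (l acc : _), l.length ≤ fuel →
    PySem.Chars.replace.go ['_'] [' '] fuel l acc = acc.reverse ++ l.map subU := by
  intro fuel
  induction fuel with
  | zero =>
    intro l acc h
    rw [PySem.Chars.replace.go]
    simp at h
    simp [h]
  | succ f ih =>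
    intro l acc h
    cases l with
    | nil =>
      rw [PySem.Chars.replace.go]
      simp
      omega
    | cons c rest =>
      rw [PySem.Chars.replace.go]
      by_cases hc : c = '_'
      · subst hc
        simp only [List.isPrefixOf, beq_self_eq_true, Bool.true_and, if_pos, List.length_cons,
          List.length_nil, List.drop_succ_cons, List.drop_zero, List.reverse_singleton,
          List.singleton_append]
        rw [ih rest (' ' :: acc) (by simpa using Nat.le_of_succ_le_succ h)]
        simp [subU]
      · have hbeq : ('_' == c) = false := by simpa using fun hh => hc hh.symm
        simp only [List.isPrefixOf, hbeq, Bool.false_and, if_neg, Bool.false_eq_true,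
          not_false_iff]
        rw [ih rest (c :: acc) (by simpa using Nat.le_of_succ_le_succ h)]
        simp [subU, hc]

lemma replace_eq_map (s : List Char) :
    PySem.Chars.replace s ['_'] [' '] = s.map subU := by
  rw [PySem.Chars.replace]
  simp only [List.isEmpty_cons, if_neg, Bool.false_eq_true, not_false_iff]
  exact goR_spec s.length s [] (le_refl _)

lemma map_subU_noU (p : List Char) (hp : '_' ∉ p) : p.map subU = p := by
  induction p with
  | nil => rfl
  | cons c cs ih =>
    have hc : c ≠ '_' := fun h => hp (h ▸ List.mem_cons_self ..)
    simp only [List.map_cons, subU, if_neg hc,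
      ih (fun h => hp (List.mem_cons_of_mem _ h))]

lemma map_subU_join (ps : List (List Char)) (hps : ∀ p ∈ ps, '_' ∉ p) :
    (PySem.Chars.join ['_'] ps).map subU = PySem.Chars.join [' '] ps := by
  induction ps with
  | nil => simp [PySem.Chars.join_nil]
  | cons p qs ih =>
    cases qs with
    | nil =>
      rw [PySem.Chars.join_singleton, PySem.Chars.join_singleton]
      exact map_subU_noU p (hps p (List.mem_cons_self ..))
    | cons q qs' =>
      rw [PySem.Chars.join_cons_cons, PySem.Chars.join_cons_cons]
      simp only [List.map_append]
      rw [map_subU_noU p (hps p (List.mem_cons_self ..)),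
        ih (fun x hx => hps x (List.mem_cons_of_mem _ hx))]
      simp [subU]

-- B's fold-based title equals A's recursive title
lemma titleB_go (cs : List Char) : ∀ (b : Bool) (acc : List Char),
    (cs.foldl titleStep (b, acc)).2.reverse = acc.reverse ++ pyTitle b cs := by
  induction cs with
  | nil => intro b acc; simp [pyTitle]
  | cons c cs ih =>
    intro b acc
    simp only [List.foldl_cons, titleStep, pyTitle]
    rw [ih]
    simp

lemma titleB_eq (cs : List Char) : titleB cs = pyTitle false cs := by
  rw [titleB, titleB_go cs false []]
  simp

-- first-match scan returns the fallback when nothing matches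
lemma goA_no_match (slug : List Char) (L : List (String × String × String))
    (h : ∀ e ∈ L, PySem.Chars.startswith slug e.1.toList = false) :
    goA slug L = slugFallback slug := by
  induction L with
  | nil => rfl
  | cons e rest ih =>
    obtain ⟨p, label, ph⟩ := e
    simp only [goA, h (p, label, ph) (List.mem_cons_self ..), Bool.false_eq_true, if_neg,
      not_false_iff]
    exact ih (fun e' he' => h e' (List.mem_cons_of_mem _ he'))

-- the action text after a matched one-token prefix
lemma action1 (t : List Char) (qs : List (List Char)) (hqs : ∀ p ∈ qs, '_' ∉ p)
    (hne : qs ≠ []) (n : Nat) (hn : (t ++ ['_']).length = n) :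
    pyTitle false (PySem.Chars.replace ((PySem.Chars.join ['_'] (t :: qs)).drop n) ['_'] [' ']) =
      titleB (PySem.Chars.join [' '] qs) := by
  cases qs with
  | nil => exact absurd rfl hne
  | cons q qs' =>
    rw [PySem.Chars.join_cons_cons, List.drop_left' hn, replace_eq_map,
      map_subU_join _ hqs, titleB_eq]

-- the action text after a matched two-token prefix
lemma action2 (t u : List Char) (qs : List (List Char)) (hqs : ∀ p ∈ qs, '_' ∉ p)
    (hne : qs ≠ []) (n : Nat) (hn : ((t ++ '_' :: u) ++ ['_']).length = n) :
    pyTitle false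
        (PySem.Chars.replace ((PySem.Chars.join ['_'] (t :: u :: qs)).drop n) ['_'] [' ']) =
      titleB (PySem.Chars.join [' '] qs) := by
  cases qs with
  | nil => exact absurd rfl hne
  | cons q qs' =>
    rw [PySem.Chars.join_cons_cons, PySem.Chars.join_cons_cons]
    rw [show t ++ ['_'] ++ (u ++ ['_'] ++ PySem.Chars.join ['_'] (q :: qs')) =
        ((t ++ '_' :: u) ++ ['_']) ++ PySem.Chars.join ['_'] (q :: qs') by simp]
    rw [List.drop_left' hn, replace_eq_map, map_subU_join _ hqs, titleB_eq]

-- ===== VERDICT (by name: the statement is the Claim_ definition above) =====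
set_option maxHeartbeats 1600000 in
theorem parse_slug_py_spec : Claim_equal_parse_slug_py := by
  intro s _
  unfold Spec_parse_slug_py parse_slug_py parse_slug_py_alt
  rw [splitOn_eq]
  generalize PySem.Chars.upper s.toList = slug
  have hU := mySplit_noU slug
  cases hpp : mySplit slug with
  | nil => exact absurd hpp (mySplit_ne_nil slug)
  | cons p0 qs =>
    have hjoin : PySem.Chars.join ['_'] (p0 :: qs) = slug := by
      rw [← hpp, join_mySplit]
    rw [hpp] at hU
    cases qs with
    | nil =>
      have h0 : '_' ∉ p0 := hU p0 (List.mem_cons_self ..)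
      have hslug : slug = p0 := by rw [← hjoin, PySem.Chars.join_singleton]
      have hA : goA slug serviceDisplayMap = slugFallback slug := by
        apply goA_no_match
        intro e he
        by_contra hcon
        have htrue : PySem.Chars.startswith slug e.1.toList = true := by
          revert hcon; cases PySem.Chars.startswith slug e.1.toList <;> simp
        have hm : '_' ∈ e.1.toList := by
          revert he
          have : ∀ e' ∈ serviceDisplayMap, '_' ∈ (e'.1.toList) := by decide
          exact this e
        have hsub := ((PySem.Chars.startswith_iff _ _).mp htrue).subset hm
        rw [hslug] at hsub
        exact h0 hsub
      have hfb : slugFallback slug = ("Tools", String.ofList (pyTitle false p0)) := by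
        unfold slugFallback
        rw [splitOnMax_one, hpp]
        simp [replace_eq_map, hslug, map_subU_noU p0 h0]
      rw [hA, hfb]
      simp only [resolve2, titleB_eq, List.headD_cons]
    | cons p1 rest =>
      have h0 : '_' ∉ p0 := hU p0 (List.mem_cons_self ..)
      have h1 : '_' ∉ p1 := hU p1 (List.mem_cons_of_mem _ (List.mem_cons_self ..))
      have sw1' : ∀ t : List Char, '_' ∉ t →
          PySem.Chars.startswith slug (t ++ ['_']) = (t == p0) := by
        intro t ht
        rw [← hjoin]
        by_cases hpt : p0 = t
        · subst hpt
          simp only [beq_self_eq_true]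
          exact (sw_one p0 ht _ hU (by simp)).mpr ⟨p1 :: rest, rfl, by simp⟩
        · have : (t == p0) = false := by simpa using fun hh => hpt hh.symm
          rw [this]
          by_contra hcon
          have htrue : PySem.Chars.startswith (PySem.Chars.join ['_'] (p0 :: p1 :: rest))
              (t ++ ['_']) = true := by
            revert hcon; cases PySem.Chars.startswith (PySem.Chars.join ['_'] (p0 :: p1 :: rest)) (t ++ ['_']) <;> simp
          obtain ⟨qs', heq, -⟩ := (sw_one t ht _ hU (by simp)).mp htrue
          exact hpt (List.cons_eq_cons.mp heq).1
      have sw2' : ∀ t u : List Char, '_' ∉ t → '_' ∉ u →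
          PySem.Chars.startswith slug (t ++ '_' :: (u ++ ['_'])) =
            (t == p0 && u == p1 && !rest.isEmpty) := by
        intro t u ht hu
        rw [← hjoin]
        by_cases hmatch : p0 = t ∧ p1 = u ∧ rest ≠ []
        · obtain ⟨rfl, rfl, hr⟩ := hmatch
          simp only [beq_self_eq_true, Bool.true_and]
          rw [(sw_two p0 p1 ht hu _ hU (by simp)).mpr ⟨rest, rfl, hr⟩]
          simpa using hr
        · have hfalse : (t == p0 && u == p1 && !rest.isEmpty) = false := by
            rcases Decidable.not_and_iff_not_or_not.mp hmatch with h | h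
            · have : (t == p0) = false := by simpa using fun hh => h hh.symm
              simp [this]
            · rcases Decidable.not_and_iff_not_or_not.mp h with h' | h'
              · have : (u == p1) = false := by simpa using fun hh => h' hh.symm
                simp [this]
              · have : rest = [] := Decidable.not_not.mp h'
                simp [this]
          rw [hfalse]
          by_contra hcon
          have htrue : PySem.Chars.startswith (PySem.Chars.join ['_'] (p0 :: p1 :: rest))
              (t ++ '_' :: (u ++ ['_'])) = true := by
            revert hcon
            cases PySem.Chars.startswith (PySem.Chars.join ['_'] (p0 :: p1 :: rest)) (t ++ '_' :: (u ++ ['_'])) <;> simp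
          obtain ⟨qs', heq, hqs'⟩ := (sw_two t u ht hu _ hU (by simp)).mp htrue
          obtain ⟨he0, he2⟩ := List.cons_eq_cons.mp heq
          obtain ⟨hf1, hf2⟩ := List.cons_eq_cons.mp he2
          exact hmatch ⟨he0, hf1, fun hnil => hqs' (hf2 ▸ hnil)⟩
      cases rest with
      | nil =>
        have hq1 : ∀ p ∈ [p1], '_' ∉ p := by
          intro p hp; exact hU p (List.mem_cons_of_mem _ hp)
        have e1 : PySem.Chars.startswith slug ("MICROSOFT_TEAMS_".toList) = false := by
          rw [show ("MICROSOFT_TEAMS_".toList : List Char) = "MICROSOFT".toList ++ '_' :: ("TEAMS".toList ++ ['_']) by decide]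
          rw [sw2' _ _ (by decide) (by decide)]
          simp
        have e2 : PySem.Chars.startswith slug ("MICROSOFTTEAMS_".toList) = ("MICROSOFTTEAMS".toList == p0) := by
          rw [show ("MICROSOFTTEAMS_".toList : List Char) = "MICROSOFTTEAMS".toList ++ ['_'] by decide]
          exact sw1' _ (by decide)
        have e3 : PySem.Chars.startswith slug ("TEAMS_".toList) = ("TEAMS".toList == p0) := by
          rw [show ("TEAMS_".toList : List Char) = "TEAMS".toList ++ ['_'] by decide]
          exact sw1' _ (by decide)
        have e4 : PySem.Chars.startswith slug ("ONE_DRIVE_".toList) = false := by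
          rw [show ("ONE_DRIVE_".toList : List Char) = "ONE".toList ++ '_' :: ("DRIVE".toList ++ ['_']) by decide]
          rw [sw2' _ _ (by decide) (by decide)]
          simp
        have e5 : PySem.Chars.startswith slug ("ONEDRIVE_".toList) = ("ONEDRIVE".toList == p0) := by
          rw [show ("ONEDRIVE_".toList : List Char) = "ONEDRIVE".toList ++ ['_'] by decide]
          exact sw1' _ (by decide)
        have e6 : PySem.Chars.startswith slug ("GOOGLE_SHEETS_".toList) = false := by
          rw [show ("GOOGLE_SHEETS_".toList : List Char) = "GOOGLE".toList ++ '_' :: ("SHEETS".toList ++ ['_']) by decide]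
          rw [sw2' _ _ (by decide) (by decide)]
          simp
        have e7 : PySem.Chars.startswith slug ("GOOGLESHEETS_".toList) = ("GOOGLESHEETS".toList == p0) := by
          rw [show ("GOOGLESHEETS_".toList : List Char) = "GOOGLESHEETS".toList ++ ['_'] by decide]
          exact sw1' _ (by decide)
        have e8 : PySem.Chars.startswith slug ("GOOGLE_DOCS_".toList) = false := by
          rw [show ("GOOGLE_DOCS_".toList : List Char) = "GOOGLE".toList ++ '_' :: ("DOCS".toList ++ ['_']) by decide]
          rw [sw2' _ _ (by decide) (by decide)]
          simp
        have e9 : PySem.Chars.startswith slug ("GOOGLEDOCS_".toList) = ("GOOGLEDOCS".toList == p0) := by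
          rw [show ("GOOGLEDOCS_".toList : List Char) = "GOOGLEDOCS".toList ++ ['_'] by decide]
          exact sw1' _ (by decide)
        have e10 : PySem.Chars.startswith slug ("GOOGLECALENDAR_".toList) = ("GOOGLECALENDAR".toList == p0) := by
          rw [show ("GOOGLECALENDAR_".toList : List Char) = "GOOGLECALENDAR".toList ++ ['_'] by decide]
          exact sw1' _ (by decide)
        have e11 : PySem.Chars.startswith slug ("GOOGLE_CALENDAR_".toList) = false := by
          rw [show ("GOOGLE_CALENDAR_".toList : List Char) = "GOOGLE".toList ++ '_' :: ("CALENDAR".toList ++ ['_']) by decide]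
          rw [sw2' _ _ (by decide) (by decide)]
          simp
        have e12 : PySem.Chars.startswith slug ("GOOGLEDRIVE_".toList) = ("GOOGLEDRIVE".toList == p0) := by
          rw [show ("GOOGLEDRIVE_".toList : List Char) = "GOOGLEDRIVE".toList ++ ['_'] by decide]
          exact sw1' _ (by decide)
        have e13 : PySem.Chars.startswith slug ("GOOGLE_DRIVE_".toList) = false := by
          rw [show ("GOOGLE_DRIVE_".toList : List Char) = "GOOGLE".toList ++ '_' :: ("DRIVE".toList ++ ['_']) by decide]
          rw [sw2' _ _ (by decide) (by decide)]
          simp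
        have e14 : PySem.Chars.startswith slug ("EXCEL_".toList) = ("EXCEL".toList == p0) := by
          rw [show ("EXCEL_".toList : List Char) = "EXCEL".toList ++ ['_'] by decide]
          exact sw1' _ (by decide)
        have e15 : PySem.Chars.startswith slug ("SLACK_".toList) = ("SLACK".toList == p0) := by
          rw [show ("SLACK_".toList : List Char) = "SLACK".toList ++ ['_'] by decide]
          exact sw1' _ (by decide)
        have e16 : PySem.Chars.startswith slug ("GMAIL_".toList) = ("GMAIL".toList == p0) := by
          rw [show ("GMAIL_".toList : List Char) = "GMAIL".toList ++ ['_'] by decide]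
          exact sw1' _ (by decide)
        have e17 : PySem.Chars.startswith slug ("GITHUB_".toList) = ("GITHUB".toList == p0) := by
          rw [show ("GITHUB_".toList : List Char) = "GITHUB".toList ++ ['_'] by decide]
          exact sw1' _ (by decide)
        have e18 : PySem.Chars.startswith slug ("CANVA_".toList) = ("CANVA".toList == p0) := by
          rw [show ("CANVA_".toList : List Char) = "CANVA".toList ++ ['_'] by decide]
          exact sw1' _ (by decide)
        have e19 : PySem.Chars.startswith slug ("APIFY_".toList) = ("APIFY".toList == p0) := by
          rw [show ("APIFY_".toList : List Char) = "APIFY".toList ++ ['_'] by decide]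
          exact sw1' _ (by decide)
        have e20 : PySem.Chars.startswith slug ("FIRECRAWL_".toList) = ("FIRECRAWL".toList == p0) := by
          rw [show ("FIRECRAWL_".toList : List Char) = "FIRECRAWL".toList ++ ['_'] by decide]
          exact sw1' _ (by decide)
        have e21 : PySem.Chars.startswith slug ("SUPABASE_".toList) = ("SUPABASE".toList == p0) := by
          rw [show ("SUPABASE_".toList : List Char) = "SUPABASE".toList ++ ['_'] by decide]
          exact sw1' _ (by decide)
        have e22 : PySem.Chars.startswith slug ("PINECONE_".toList) = ("PINECONE".toList == p0) := by
          rw [show ("PINECONE_".toList : List Char) = "PINECONE".toList ++ ['_'] by decide]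
          exact sw1' _ (by decide)
        have e23 : PySem.Chars.startswith slug ("RECALLAI_".toList) = ("RECALLAI".toList == p0) := by
          rw [show ("RECALLAI_".toList : List Char) = "RECALLAI".toList ++ ['_'] by decide]
          exact sw1' _ (by decide)
        have e24 : PySem.Chars.startswith slug ("PERPLEXITYAI_".toList) = ("PERPLEXITYAI".toList == p0) := by
          rw [show ("PERPLEXITYAI_".toList : List Char) = "PERPLEXITYAI".toList ++ ['_'] by decide]
          exact sw1' _ (by decide)
        have e25 : PySem.Chars.startswith slug ("GAMMA_".toList) = ("GAMMA".toList == p0) := by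
          rw [show ("GAMMA_".toList : List Char) = "GAMMA".toList ++ ['_'] by decide]
          exact sw1' _ (by decide)
        have e26 : PySem.Chars.startswith slug ("COMPOSIO_SEARCH_".toList) = false := by
          rw [show ("COMPOSIO_SEARCH_".toList : List Char) = "COMPOSIO".toList ++ '_' :: ("SEARCH".toList ++ ['_']) by decide]
          rw [sw2' _ _ (by decide) (by decide)]
          simp
        have e27 : PySem.Chars.startswith slug ("COMPOSIO_".toList) = ("COMPOSIO".toList == p0) := by
          rw [show ("COMPOSIO_".toList : List Char) = "COMPOSIO".toList ++ ['_'] by decide]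
          exact sw1' _ (by decide)
        simp only [goA, serviceDisplayMap, e1, e2, e3, e4, e5, e6, e7, e8, e9, e10, e11, e12, e13, e14, e15, e16, e17, e18, e19, e20, e21, e22, e23, e24, e25, e26, e27]
        by_cases hc2 : ("MICROSOFTTEAMS".toList == p0) = true
        · have hp0 : p0 = "MICROSOFTTEAMS".toList := (eq_of_beq hc2).symm
          subst hp0
          simp only [mkAction]
          rw [← hjoin]
          rw [action1 ("MICROSOFTTEAMS".toList) ([p1]) hq1 (by simp) (("MICROSOFTTEAMS_".toList).length) (by decide)]
          rfl
        · -- MICROSOFTTEAMS_ does not match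
          by_cases hc3 : ("TEAMS".toList == p0) = true
          · have hp0 : p0 = "TEAMS".toList := (eq_of_beq hc3).symm
            subst hp0
            simp only [mkAction]
            rw [← hjoin]
            rw [action1 ("TEAMS".toList) ([p1]) hq1 (by simp) (("TEAMS_".toList).length) (by decide)]
            rfl
          · -- TEAMS_ does not match
            by_cases hc5 : ("ONEDRIVE".toList == p0) = true
            · have hp0 : p0 = "ONEDRIVE".toList := (eq_of_beq hc5).symm
              subst hp0
              simp only [mkAction]
              rw [← hjoin]
              rw [action1 ("ONEDRIVE".toList) ([p1]) hq1 (by simp) (("ONEDRIVE_".toList).length) (by decide)]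
              rfl
            · -- ONEDRIVE_ does not match
              by_cases hc7 : ("GOOGLESHEETS".toList == p0) = true
              · have hp0 : p0 = "GOOGLESHEETS".toList := (eq_of_beq hc7).symm
                subst hp0
                simp only [mkAction]
                rw [← hjoin]
                rw [action1 ("GOOGLESHEETS".toList) ([p1]) hq1 (by simp) (("GOOGLESHEETS_".toList).length) (by decide)]
                rfl
              · -- GOOGLESHEETS_ does not match
                by_cases hc9 : ("GOOGLEDOCS".toList == p0) = true
                · have hp0 : p0 = "GOOGLEDOCS".toList := (eq_of_beq hc9).symm
                  subst hp0
                  simp only [mkAction]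
                  rw [← hjoin]
                  rw [action1 ("GOOGLEDOCS".toList) ([p1]) hq1 (by simp) (("GOOGLEDOCS_".toList).length) (by decide)]
                  rfl
                · -- GOOGLEDOCS_ does not match
                  by_cases hc10 : ("GOOGLECALENDAR".toList == p0) = true
                  · have hp0 : p0 = "GOOGLECALENDAR".toList := (eq_of_beq hc10).symm
                    subst hp0
                    simp only [mkAction]
                    rw [← hjoin]
                    rw [action1 ("GOOGLECALENDAR".toList) ([p1]) hq1 (by simp) (("GOOGLECALENDAR_".toList).length) (by decide)]
                    rfl
                  · -- GOOGLECALENDAR_ does not match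
                    by_cases hc12 : ("GOOGLEDRIVE".toList == p0) = true
                    · have hp0 : p0 = "GOOGLEDRIVE".toList := (eq_of_beq hc12).symm
                      subst hp0
                      simp only [mkAction]
                      rw [← hjoin]
                      rw [action1 ("GOOGLEDRIVE".toList) ([p1]) hq1 (by simp) (("GOOGLEDRIVE_".toList).length) (by decide)]
                      rfl
                    · -- GOOGLEDRIVE_ does not match
                      by_cases hc14 : ("EXCEL".toList == p0) = true
                      · have hp0 : p0 = "EXCEL".toList := (eq_of_beq hc14).symm
                        subst hp0
                        simp only [mkAction]
                        rw [← hjoin]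
                        rw [action1 ("EXCEL".toList) ([p1]) hq1 (by simp) (("EXCEL_".toList).length) (by decide)]
                        rfl
                      · -- EXCEL_ does not match
                        by_cases hc15 : ("SLACK".toList == p0) = true
                        · have hp0 : p0 = "SLACK".toList := (eq_of_beq hc15).symm
                          subst hp0
                          simp only [mkAction]
                          rw [← hjoin]
                          rw [action1 ("SLACK".toList) ([p1]) hq1 (by simp) (("SLACK_".toList).length) (by decide)]
                          rfl
                        · -- SLACK_ does not match
                          by_cases hc16 : ("GMAIL".toList == p0) = true
                          · have hp0 : p0 = "GMAIL".toList := (eq_of_beq hc16).symm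
                            subst hp0
                            simp only [mkAction]
                            rw [← hjoin]
                            rw [action1 ("GMAIL".toList) ([p1]) hq1 (by simp) (("GMAIL_".toList).length) (by decide)]
                            rfl
                          · -- GMAIL_ does not match
                            by_cases hc17 : ("GITHUB".toList == p0) = true
                            · have hp0 : p0 = "GITHUB".toList := (eq_of_beq hc17).symm
                              subst hp0
                              simp only [mkAction]
                              rw [← hjoin]
                              rw [action1 ("GITHUB".toList) ([p1]) hq1 (by simp) (("GITHUB_".toList).length) (by decide)]
                              rfl
                            · -- GITHUB_ does not match
                              by_cases hc18 : ("CANVA".toList == p0) = true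
                              · have hp0 : p0 = "CANVA".toList := (eq_of_beq hc18).symm
                                subst hp0
                                simp only [mkAction]
                                rw [← hjoin]
                                rw [action1 ("CANVA".toList) ([p1]) hq1 (by simp) (("CANVA_".toList).length) (by decide)]
                                rfl
                              · -- CANVA_ does not match
                                by_cases hc19 : ("APIFY".toList == p0) = true
                                · have hp0 : p0 = "APIFY".toList := (eq_of_beq hc19).symm
                                  subst hp0
                                  simp only [mkAction]
                                  rw [← hjoin]
                                  rw [action1 ("APIFY".toList) ([p1]) hq1 (by simp) (("APIFY_".toList).length) (by decide)]
                                  rfl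
                                · -- APIFY_ does not match
                                  by_cases hc20 : ("FIRECRAWL".toList == p0) = true
                                  · have hp0 : p0 = "FIRECRAWL".toList := (eq_of_beq hc20).symm
                                    subst hp0
                                    simp only [mkAction]
                                    rw [← hjoin]
                                    rw [action1 ("FIRECRAWL".toList) ([p1]) hq1 (by simp) (("FIRECRAWL_".toList).length) (by decide)]
                                    rfl
                                  · -- FIRECRAWL_ does not match
                                    by_cases hc21 : ("SUPABASE".toList == p0) = true
                                    · have hp0 : p0 = "SUPABASE".toList := (eq_of_beq hc21).symm
                                      subst hp0
                                      simp only [mkAction]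
                                      rw [← hjoin]
                                      rw [action1 ("SUPABASE".toList) ([p1]) hq1 (by simp) (("SUPABASE_".toList).length) (by decide)]
                                      rfl
                                    · -- SUPABASE_ does not match
                                      by_cases hc22 : ("PINECONE".toList == p0) = true
                                      · have hp0 : p0 = "PINECONE".toList := (eq_of_beq hc22).symm
                                        subst hp0
                                        simp only [mkAction]
                                        rw [← hjoin]
                                        rw [action1 ("PINECONE".toList) ([p1]) hq1 (by simp) (("PINECONE_".toList).length) (by decide)]
                                        rfl
                                      · -- PINECONE_ does not match
                                        by_cases hc23 : ("RECALLAI".toList == p0) = true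
                                        · have hp0 : p0 = "RECALLAI".toList := (eq_of_beq hc23).symm
                                          subst hp0
                                          simp only [mkAction]
                                          rw [← hjoin]
                                          rw [action1 ("RECALLAI".toList) ([p1]) hq1 (by simp) (("RECALLAI_".toList).length) (by decide)]
                                          rfl
                                        · -- RECALLAI_ does not match
                                          by_cases hc24 : ("PERPLEXITYAI".toList == p0) = true
                                          · have hp0 : p0 = "PERPLEXITYAI".toList := (eq_of_beq hc24).symm
                                            subst hp0
                                            simp only [mkAction]
                                            rw [← hjoin]
                                            rw [action1 ("PERPLEXITYAI".toList) ([p1]) hq1 (by simp) (("PERPLEXITYAI_".toList).length) (by decide)]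
                                            rfl
                                          · -- PERPLEXITYAI_ does not match
                                            by_cases hc25 : ("GAMMA".toList == p0) = true
                                            · have hp0 : p0 = "GAMMA".toList := (eq_of_beq hc25).symm
                                              subst hp0
                                              simp only [mkAction]
                                              rw [← hjoin]
                                              rw [action1 ("GAMMA".toList) ([p1]) hq1 (by simp) (("GAMMA_".toList).length) (by decide)]
                                              rfl
                                            · -- GAMMA_ does not match
                                              by_cases hc27 : ("COMPOSIO".toList == p0) = true
                                              · have hp0 : p0 = "COMPOSIO".toList := (eq_of_beq hc27).symm
                                                subst hp0
                                                simp only [mkAction]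
                                                rw [← hjoin]
                                                rw [action1 ("COMPOSIO".toList) ([p1]) hq1 (by simp) (("COMPOSIO_".toList).length) (by decide)]
                                                rfl
                                              · -- COMPOSIO_ does not match
                                                rw [if_neg (by simp : ¬ ((false : Bool) = true))]
                                                rw [if_neg hc2]
                                                rw [if_neg hc3]
                                                rw [if_neg (by simp : ¬ ((false : Bool) = true))]
                                                rw [if_neg hc5]
                                                rw [if_neg (by simp : ¬ ((false : Bool) = true))]
                                                rw [if_neg hc7]
                                                rw [if_neg (by simp : ¬ ((false : Bool) = true))]
                                                rw [if_neg hc9]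
                                                rw [if_neg hc10]
                                                rw [if_neg (by simp : ¬ ((false : Bool) = true))]
                                                rw [if_neg hc12]
                                                rw [if_neg (by simp : ¬ ((false : Bool) = true))]
                                                rw [if_neg hc14]
                                                rw [if_neg hc15]
                                                rw [if_neg hc16]
                                                rw [if_neg hc17]
                                                rw [if_neg hc18]
                                                rw [if_neg hc19]
                                                rw [if_neg hc20]
                                                rw [if_neg hc21]
                                                rw [if_neg hc22]
                                                rw [if_neg hc23]
                                                rw [if_neg hc24]
                                                rw [if_neg hc25]
                                                rw [if_neg (by simp : ¬ ((false : Bool) = true))]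
                                                rw [if_neg hc27]
                                                have hfb : slugFallback slug = (String.ofList (pyTitle false p0), String.ofList (pyTitle false p1)) := by
                                                  unfold slugFallback
                                                  rw [splitOnMax_one, hpp]
                                                  simp [replace_eq_map, map_subU_noU p1 (hq1 p1 (List.mem_cons_self ..))]
                                                rw [hfb]
                                                simp only [resolve2, twoTokenLabels, oneTokenLabels, PySem.Dict.get?_mk_cons]
                                                rw [if_neg hc2, if_neg hc3, if_neg hc5, if_neg hc7, if_neg hc9, if_neg hc10, if_neg hc12, if_neg hc14, if_neg hc15, if_neg hc16, if_neg hc17, if_neg hc18, if_neg hc19, if_neg hc20, if_neg hc21, if_neg hc22, if_neg hc23, if_neg hc24, if_neg hc25, if_neg hc27]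
                                                simp only [Option.map, List.drop_succ_cons, List.drop_zero, PySem.Chars.join_singleton, titleB_eq, List.headD_cons]
                                                rfl
      | cons p2 rest2 =>
        have hq1 : ∀ p ∈ p1 :: p2 :: rest2, '_' ∉ p := by
          intro p hp; exact hU p (List.mem_cons_of_mem _ hp)
        have hq2 : ∀ p ∈ p2 :: rest2, '_' ∉ p := by
          intro p hp; exact hU p (List.mem_cons_of_mem _ (List.mem_cons_of_mem _ hp))
        have e1 : PySem.Chars.startswith slug ("MICROSOFT_TEAMS_".toList) = ("MICROSOFT".toList == p0 && "TEAMS".toList == p1) := by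
          rw [show ("MICROSOFT_TEAMS_".toList : List Char) = "MICROSOFT".toList ++ '_' :: ("TEAMS".toList ++ ['_']) by decide]
          rw [sw2' _ _ (by decide) (by decide)]
          simp
        have e2 : PySem.Chars.startswith slug ("MICROSOFTTEAMS_".toList) = ("MICROSOFTTEAMS".toList == p0) := by
          rw [show ("MICROSOFTTEAMS_".toList : List Char) = "MICROSOFTTEAMS".toList ++ ['_'] by decide]
          exact sw1' _ (by decide)
        have e3 : PySem.Chars.startswith slug ("TEAMS_".toList) = ("TEAMS".toList == p0) := by
          rw [show ("TEAMS_".toList : List Char) = "TEAMS".toList ++ ['_'] by decide]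
          exact sw1' _ (by decide)
        have e4 : PySem.Chars.startswith slug ("ONE_DRIVE_".toList) = ("ONE".toList == p0 && "DRIVE".toList == p1) := by
          rw [show ("ONE_DRIVE_".toList : List Char) = "ONE".toList ++ '_' :: ("DRIVE".toList ++ ['_']) by decide]
          rw [sw2' _ _ (by decide) (by decide)]
          simp
        have e5 : PySem.Chars.startswith slug ("ONEDRIVE_".toList) = ("ONEDRIVE".toList == p0) := by
          rw [show ("ONEDRIVE_".toList : List Char) = "ONEDRIVE".toList ++ ['_'] by decide]
          exact sw1' _ (by decide)
        have e6 : PySem.Chars.startswith slug ("GOOGLE_SHEETS_".toList) = ("GOOGLE".toList == p0 && "SHEETS".toList == p1) := by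
          rw [show ("GOOGLE_SHEETS_".toList : List Char) = "GOOGLE".toList ++ '_' :: ("SHEETS".toList ++ ['_']) by decide]
          rw [sw2' _ _ (by decide) (by decide)]
          simp
        have e7 : PySem.Chars.startswith slug ("GOOGLESHEETS_".toList) = ("GOOGLESHEETS".toList == p0) := by
          rw [show ("GOOGLESHEETS_".toList : List Char) = "GOOGLESHEETS".toList ++ ['_'] by decide]
          exact sw1' _ (by decide)
        have e8 : PySem.Chars.startswith slug ("GOOGLE_DOCS_".toList) = ("GOOGLE".toList == p0 && "DOCS".toList == p1) := by
          rw [show ("GOOGLE_DOCS_".toList : List Char) = "GOOGLE".toList ++ '_' :: ("DOCS".toList ++ ['_']) by decide]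
          rw [sw2' _ _ (by decide) (by decide)]
          simp
        have e9 : PySem.Chars.startswith slug ("GOOGLEDOCS_".toList) = ("GOOGLEDOCS".toList == p0) := by
          rw [show ("GOOGLEDOCS_".toList : List Char) = "GOOGLEDOCS".toList ++ ['_'] by decide]
          exact sw1' _ (by decide)
        have e10 : PySem.Chars.startswith slug ("GOOGLECALENDAR_".toList) = ("GOOGLECALENDAR".toList == p0) := by
          rw [show ("GOOGLECALENDAR_".toList : List Char) = "GOOGLECALENDAR".toList ++ ['_'] by decide]
          exact sw1' _ (by decide)
        have e11 : PySem.Chars.startswith slug ("GOOGLE_CALENDAR_".toList) = ("GOOGLE".toList == p0 && "CALENDAR".toList == p1) := by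
          rw [show ("GOOGLE_CALENDAR_".toList : List Char) = "GOOGLE".toList ++ '_' :: ("CALENDAR".toList ++ ['_']) by decide]
          rw [sw2' _ _ (by decide) (by decide)]
          simp
        have e12 : PySem.Chars.startswith slug ("GOOGLEDRIVE_".toList) = ("GOOGLEDRIVE".toList == p0) := by
          rw [show ("GOOGLEDRIVE_".toList : List Char) = "GOOGLEDRIVE".toList ++ ['_'] by decide]
          exact sw1' _ (by decide)
        have e13 : PySem.Chars.startswith slug ("GOOGLE_DRIVE_".toList) = ("GOOGLE".toList == p0 && "DRIVE".toList == p1) := by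
          rw [show ("GOOGLE_DRIVE_".toList : List Char) = "GOOGLE".toList ++ '_' :: ("DRIVE".toList ++ ['_']) by decide]
          rw [sw2' _ _ (by decide) (by decide)]
          simp
        have e14 : PySem.Chars.startswith slug ("EXCEL_".toList) = ("EXCEL".toList == p0) := by
          rw [show ("EXCEL_".toList : List Char) = "EXCEL".toList ++ ['_'] by decide]
          exact sw1' _ (by decide)
        have e15 : PySem.Chars.startswith slug ("SLACK_".toList) = ("SLACK".toList == p0) := by
          rw [show ("SLACK_".toList : List Char) = "SLACK".toList ++ ['_'] by decide]
          exact sw1' _ (by decide)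
        have e16 : PySem.Chars.startswith slug ("GMAIL_".toList) = ("GMAIL".toList == p0) := by
          rw [show ("GMAIL_".toList : List Char) = "GMAIL".toList ++ ['_'] by decide]
          exact sw1' _ (by decide)
        have e17 : PySem.Chars.startswith slug ("GITHUB_".toList) = ("GITHUB".toList == p0) := by
          rw [show ("GITHUB_".toList : List Char) = "GITHUB".toList ++ ['_'] by decide]
          exact sw1' _ (by decide)
        have e18 : PySem.Chars.startswith slug ("CANVA_".toList) = ("CANVA".toList == p0) := by
          rw [show ("CANVA_".toList : List Char) = "CANVA".toList ++ ['_'] by decide]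
          exact sw1' _ (by decide)
        have e19 : PySem.Chars.startswith slug ("APIFY_".toList) = ("APIFY".toList == p0) := by
          rw [show ("APIFY_".toList : List Char) = "APIFY".toList ++ ['_'] by decide]
          exact sw1' _ (by decide)
        have e20 : PySem.Chars.startswith slug ("FIRECRAWL_".toList) = ("FIRECRAWL".toList == p0) := by
          rw [show ("FIRECRAWL_".toList : List Char) = "FIRECRAWL".toList ++ ['_'] by decide]
          exact sw1' _ (by decide)
        have e21 : PySem.Chars.startswith slug ("SUPABASE_".toList) = ("SUPABASE".toList == p0) := by
          rw [show ("SUPABASE_".toList : List Char) = "SUPABASE".toList ++ ['_'] by decide]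
          exact sw1' _ (by decide)
        have e22 : PySem.Chars.startswith slug ("PINECONE_".toList) = ("PINECONE".toList == p0) := by
          rw [show ("PINECONE_".toList : List Char) = "PINECONE".toList ++ ['_'] by decide]
          exact sw1' _ (by decide)
        have e23 : PySem.Chars.startswith slug ("RECALLAI_".toList) = ("RECALLAI".toList == p0) := by
          rw [show ("RECALLAI_".toList : List Char) = "RECALLAI".toList ++ ['_'] by decide]
          exact sw1' _ (by decide)
        have e24 : PySem.Chars.startswith slug ("PERPLEXITYAI_".toList) = ("PERPLEXITYAI".toList == p0) := by
          rw [show ("PERPLEXITYAI_".toList : List Char) = "PERPLEXITYAI".toList ++ ['_'] by decide]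
          exact sw1' _ (by decide)
        have e25 : PySem.Chars.startswith slug ("GAMMA_".toList) = ("GAMMA".toList == p0) := by
          rw [show ("GAMMA_".toList : List Char) = "GAMMA".toList ++ ['_'] by decide]
          exact sw1' _ (by decide)
        have e26 : PySem.Chars.startswith slug ("COMPOSIO_SEARCH_".toList) = ("COMPOSIO".toList == p0 && "SEARCH".toList == p1) := by
          rw [show ("COMPOSIO_SEARCH_".toList : List Char) = "COMPOSIO".toList ++ '_' :: ("SEARCH".toList ++ ['_']) by decide]
          rw [sw2' _ _ (by decide) (by decide)]
          simp
        have e27 : PySem.Chars.startswith slug ("COMPOSIO_".toList) = ("COMPOSIO".toList == p0) := by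
          rw [show ("COMPOSIO_".toList : List Char) = "COMPOSIO".toList ++ ['_'] by decide]
          exact sw1' _ (by decide)
        simp only [goA, serviceDisplayMap, e1, e2, e3, e4, e5, e6, e7, e8, e9, e10, e11, e12, e13, e14, e15, e16, e17, e18, e19, e20, e21, e22, e23, e24, e25, e26, e27]
        by_cases hc1 : ("MICROSOFT".toList == p0 && "TEAMS".toList == p1) = true
        · rw [Bool.and_eq_true] at hc1
          obtain ⟨ha, hb⟩ := hc1
          have hp0 : p0 = "MICROSOFT".toList := (eq_of_beq ha).symm
          have hp1 : p1 = "TEAMS".toList := (eq_of_beq hb).symm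
          subst hp0; subst hp1
          simp only [mkAction]
          rw [← hjoin]
          rw [action2 ("MICROSOFT".toList) ("TEAMS".toList) (p2 :: rest2) hq2 (by simp) (("MICROSOFT_TEAMS_".toList).length) (by decide)]
          rfl
        · -- MICROSOFT_TEAMS_ does not match
          by_cases hc2 : ("MICROSOFTTEAMS".toList == p0) = true
          · have hp0 : p0 = "MICROSOFTTEAMS".toList := (eq_of_beq hc2).symm
            subst hp0
            simp only [mkAction]
            rw [← hjoin]
            rw [action1 ("MICROSOFTTEAMS".toList) ((p1 :: p2 :: rest2)) hq1 (by simp) (("MICROSOFTTEAMS_".toList).length) (by decide)]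
            rfl
          · -- MICROSOFTTEAMS_ does not match
            by_cases hc3 : ("TEAMS".toList == p0) = true
            · have hp0 : p0 = "TEAMS".toList := (eq_of_beq hc3).symm
              subst hp0
              simp only [mkAction]
              rw [← hjoin]
              rw [action1 ("TEAMS".toList) ((p1 :: p2 :: rest2)) hq1 (by simp) (("TEAMS_".toList).length) (by decide)]
              rfl
            · -- TEAMS_ does not match
              by_cases hc4 : ("ONE".toList == p0 && "DRIVE".toList == p1) = true
              · rw [Bool.and_eq_true] at hc4
                obtain ⟨ha, hb⟩ := hc4
                have hp0 : p0 = "ONE".toList := (eq_of_beq ha).symm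
                have hp1 : p1 = "DRIVE".toList := (eq_of_beq hb).symm
                subst hp0; subst hp1
                simp only [mkAction]
                rw [← hjoin]
                rw [action2 ("ONE".toList) ("DRIVE".toList) (p2 :: rest2) hq2 (by simp) (("ONE_DRIVE_".toList).length) (by decide)]
                rfl
              · -- ONE_DRIVE_ does not match
                by_cases hc5 : ("ONEDRIVE".toList == p0) = true
                · have hp0 : p0 = "ONEDRIVE".toList := (eq_of_beq hc5).symm
                  subst hp0
                  simp only [mkAction]
                  rw [← hjoin]
                  rw [action1 ("ONEDRIVE".toList) ((p1 :: p2 :: rest2)) hq1 (by simp) (("ONEDRIVE_".toList).length) (by decide)]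
                  rfl
                · -- ONEDRIVE_ does not match
                  by_cases hc6 : ("GOOGLE".toList == p0 && "SHEETS".toList == p1) = true
                  · rw [Bool.and_eq_true] at hc6
                    obtain ⟨ha, hb⟩ := hc6
                    have hp0 : p0 = "GOOGLE".toList := (eq_of_beq ha).symm
                    have hp1 : p1 = "SHEETS".toList := (eq_of_beq hb).symm
                    subst hp0; subst hp1
                    simp only [mkAction]
                    rw [← hjoin]
                    rw [action2 ("GOOGLE".toList) ("SHEETS".toList) (p2 :: rest2) hq2 (by simp) (("GOOGLE_SHEETS_".toList).length) (by decide)]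
                    rfl
                  · -- GOOGLE_SHEETS_ does not match
                    by_cases hc7 : ("GOOGLESHEETS".toList == p0) = true
                    · have hp0 : p0 = "GOOGLESHEETS".toList := (eq_of_beq hc7).symm
                      subst hp0
                      simp only [mkAction]
                      rw [← hjoin]
                      rw [action1 ("GOOGLESHEETS".toList) ((p1 :: p2 :: rest2)) hq1 (by simp) (("GOOGLESHEETS_".toList).length) (by decide)]
                      rfl
                    · -- GOOGLESHEETS_ does not match
                      by_cases hc8 : ("GOOGLE".toList == p0 && "DOCS".toList == p1) = true
                      · rw [Bool.and_eq_true] at hc8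
                        obtain ⟨ha, hb⟩ := hc8
                        have hp0 : p0 = "GOOGLE".toList := (eq_of_beq ha).symm
                        have hp1 : p1 = "DOCS".toList := (eq_of_beq hb).symm
                        subst hp0; subst hp1
                        simp only [mkAction]
                        rw [← hjoin]
                        rw [action2 ("GOOGLE".toList) ("DOCS".toList) (p2 :: rest2) hq2 (by simp) (("GOOGLE_DOCS_".toList).length) (by decide)]
                        rfl
                      · -- GOOGLE_DOCS_ does not match
                        by_cases hc9 : ("GOOGLEDOCS".toList == p0) = true
                        · have hp0 : p0 = "GOOGLEDOCS".toList := (eq_of_beq hc9).symm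
                          subst hp0
                          simp only [mkAction]
                          rw [← hjoin]
                          rw [action1 ("GOOGLEDOCS".toList) ((p1 :: p2 :: rest2)) hq1 (by simp) (("GOOGLEDOCS_".toList).length) (by decide)]
                          rfl
                        · -- GOOGLEDOCS_ does not match
                          by_cases hc10 : ("GOOGLECALENDAR".toList == p0) = true
                          · have hp0 : p0 = "GOOGLECALENDAR".toList := (eq_of_beq hc10).symm
                            subst hp0
                            simp only [mkAction]
                            rw [← hjoin]
                            rw [action1 ("GOOGLECALENDAR".toList) ((p1 :: p2 :: rest2)) hq1 (by simp) (("GOOGLECALENDAR_".toList).length) (by decide)]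
                            rfl
                          · -- GOOGLECALENDAR_ does not match
                            by_cases hc11 : ("GOOGLE".toList == p0 && "CALENDAR".toList == p1) = true
                            · rw [Bool.and_eq_true] at hc11
                              obtain ⟨ha, hb⟩ := hc11
                              have hp0 : p0 = "GOOGLE".toList := (eq_of_beq ha).symm
                              have hp1 : p1 = "CALENDAR".toList := (eq_of_beq hb).symm
                              subst hp0; subst hp1
                              simp only [mkAction]
                              rw [← hjoin]
                              rw [action2 ("GOOGLE".toList) ("CALENDAR".toList) (p2 :: rest2) hq2 (by simp) (("GOOGLE_CALENDAR_".toList).length) (by decide)]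
                              rfl
                            · -- GOOGLE_CALENDAR_ does not match
                              by_cases hc12 : ("GOOGLEDRIVE".toList == p0) = true
                              · have hp0 : p0 = "GOOGLEDRIVE".toList := (eq_of_beq hc12).symm
                                subst hp0
                                simp only [mkAction]
                                rw [← hjoin]
                                rw [action1 ("GOOGLEDRIVE".toList) ((p1 :: p2 :: rest2)) hq1 (by simp) (("GOOGLEDRIVE_".toList).length) (by decide)]
                                rfl
                              · -- GOOGLEDRIVE_ does not match
                                by_cases hc13 : ("GOOGLE".toList == p0 && "DRIVE".toList == p1) = true
                                · rw [Bool.and_eq_true] at hc13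
                                  obtain ⟨ha, hb⟩ := hc13
                                  have hp0 : p0 = "GOOGLE".toList := (eq_of_beq ha).symm
                                  have hp1 : p1 = "DRIVE".toList := (eq_of_beq hb).symm
                                  subst hp0; subst hp1
                                  simp only [mkAction]
                                  rw [← hjoin]
                                  rw [action2 ("GOOGLE".toList) ("DRIVE".toList) (p2 :: rest2) hq2 (by simp) (("GOOGLE_DRIVE_".toList).length) (by decide)]
                                  rfl
                                · -- GOOGLE_DRIVE_ does not match
                                  by_cases hc14 : ("EXCEL".toList == p0) = true
                                  · have hp0 : p0 = "EXCEL".toList := (eq_of_beq hc14).symm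
                                    subst hp0
                                    simp only [mkAction]
                                    rw [← hjoin]
                                    rw [action1 ("EXCEL".toList) ((p1 :: p2 :: rest2)) hq1 (by simp) (("EXCEL_".toList).length) (by decide)]
                                    rfl
                                  · -- EXCEL_ does not match
                                    by_cases hc15 : ("SLACK".toList == p0) = true
                                    · have hp0 : p0 = "SLACK".toList := (eq_of_beq hc15).symm
                                      subst hp0
                                      simp only [mkAction]
                                      rw [← hjoin]
                                      rw [action1 ("SLACK".toList) ((p1 :: p2 :: rest2)) hq1 (by simp) (("SLACK_".toList).length) (by decide)]
                                      rfl
                                    · -- SLACK_ does not match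
                                      by_cases hc16 : ("GMAIL".toList == p0) = true
                                      · have hp0 : p0 = "GMAIL".toList := (eq_of_beq hc16).symm
                                        subst hp0
                                        simp only [mkAction]
                                        rw [← hjoin]
                                        rw [action1 ("GMAIL".toList) ((p1 :: p2 :: rest2)) hq1 (by simp) (("GMAIL_".toList).length) (by decide)]
                                        rfl
                                      · -- GMAIL_ does not match
                                        by_cases hc17 : ("GITHUB".toList == p0) = true
                                        · have hp0 : p0 = "GITHUB".toList := (eq_of_beq hc17).symm
                                          subst hp0
                                          simp only [mkAction]
                                          rw [← hjoin]
                                          rw [action1 ("GITHUB".toList) ((p1 :: p2 :: rest2)) hq1 (by simp) (("GITHUB_".toList).length) (by decide)]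
                                          rfl
                                        · -- GITHUB_ does not match
                                          by_cases hc18 : ("CANVA".toList == p0) = true
                                          · have hp0 : p0 = "CANVA".toList := (eq_of_beq hc18).symm
                                            subst hp0
                                            simp only [mkAction]
                                            rw [← hjoin]
                                            rw [action1 ("CANVA".toList) ((p1 :: p2 :: rest2)) hq1 (by simp) (("CANVA_".toList).length) (by decide)]
                                            rfl
                                          · -- CANVA_ does not match
                                            by_cases hc19 : ("APIFY".toList == p0) = true
                                            · have hp0 : p0 = "APIFY".toList := (eq_of_beq hc19).symm
                                              subst hp0
                                              simp only [mkAction]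
                                              rw [← hjoin]
                                              rw [action1 ("APIFY".toList) ((p1 :: p2 :: rest2)) hq1 (by simp) (("APIFY_".toList).length) (by decide)]
                                              rfl
                                            · -- APIFY_ does not match
                                              by_cases hc20 : ("FIRECRAWL".toList == p0) = true
                                              · have hp0 : p0 = "FIRECRAWL".toList := (eq_of_beq hc20).symm
                                                subst hp0
                                                simp only [mkAction]
                                                rw [← hjoin]
                                                rw [action1 ("FIRECRAWL".toList) ((p1 :: p2 :: rest2)) hq1 (by simp) (("FIRECRAWL_".toList).length) (by decide)]
                                                rfl
                                              · -- FIRECRAWL_ does not match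
                                                by_cases hc21 : ("SUPABASE".toList == p0) = true
                                                · have hp0 : p0 = "SUPABASE".toList := (eq_of_beq hc21).symm
                                                  subst hp0
                                                  simp only [mkAction]
                                                  rw [← hjoin]
                                                  rw [action1 ("SUPABASE".toList) ((p1 :: p2 :: rest2)) hq1 (by simp) (("SUPABASE_".toList).length) (by decide)]
                                                  rfl
                                                · -- SUPABASE_ does not match
                                                  by_cases hc22 : ("PINECONE".toList == p0) = true
                                                  · have hp0 : p0 = "PINECONE".toList := (eq_of_beq hc22).symm
                                                    subst hp0
                                                    simp only [mkAction]
                                                    rw [← hjoin]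
                                                    rw [action1 ("PINECONE".toList) ((p1 :: p2 :: rest2)) hq1 (by simp) (("PINECONE_".toList).length) (by decide)]
                                                    rfl
                                                  · -- PINECONE_ does not match
                                                    by_cases hc23 : ("RECALLAI".toList == p0) = true
                                                    · have hp0 : p0 = "RECALLAI".toList := (eq_of_beq hc23).symm
                                                      subst hp0
                                                      simp only [mkAction]
                                                      rw [← hjoin]
                                                      rw [action1 ("RECALLAI".toList) ((p1 :: p2 :: rest2)) hq1 (by simp) (("RECALLAI_".toList).length) (by decide)]
                                                      rfl
                                                    · -- RECALLAI_ does not match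
                                                      by_cases hc24 : ("PERPLEXITYAI".toList == p0) = true
                                                      · have hp0 : p0 = "PERPLEXITYAI".toList := (eq_of_beq hc24).symm
                                                        subst hp0
                                                        simp only [mkAction]
                                                        rw [← hjoin]
                                                        rw [action1 ("PERPLEXITYAI".toList) ((p1 :: p2 :: rest2)) hq1 (by simp) (("PERPLEXITYAI_".toList).length) (by decide)]
                                                        rfl
                                                      · -- PERPLEXITYAI_ does not match
                                                        by_cases hc25 : ("GAMMA".toList == p0) = true
                                                        · have hp0 : p0 = "GAMMA".toList := (eq_of_beq hc25).symm
                                                          subst hp0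
                                                          simp only [mkAction]
                                                          rw [← hjoin]
                                                          rw [action1 ("GAMMA".toList) ((p1 :: p2 :: rest2)) hq1 (by simp) (("GAMMA_".toList).length) (by decide)]
                                                          rfl
                                                        · -- GAMMA_ does not match
                                                          by_cases hc26 : ("COMPOSIO".toList == p0 && "SEARCH".toList == p1) = true
                                                          · rw [Bool.and_eq_true] at hc26
                                                            obtain ⟨ha, hb⟩ := hc26
                                                            have hp0 : p0 = "COMPOSIO".toList := (eq_of_beq ha).symm
                                                            have hp1 : p1 = "SEARCH".toList := (eq_of_beq hb).symm
                                                            subst hp0; subst hp1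
                                                            simp only [mkAction]
                                                            rw [← hjoin]
                                                            rw [action2 ("COMPOSIO".toList) ("SEARCH".toList) (p2 :: rest2) hq2 (by simp) (("COMPOSIO_SEARCH_".toList).length) (by decide)]
                                                            rfl
                                                          · -- COMPOSIO_SEARCH_ does not match
                                                            by_cases hc27 : ("COMPOSIO".toList == p0) = true
                                                            · have hp0 : p0 = "COMPOSIO".toList := (eq_of_beq hc27).symm
                                                              subst hp0
                                                              have hps : ¬ ("SEARCH".toList = p1) := by simpa using hc26
                                                              have hg2 : PySem.Dict.get? twoTokenLabels ("COMPOSIO".toList, p1) = none := by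
                                                                simp [twoTokenLabels, PySem.Dict.get?_mk_cons]
                                                                rw [if_neg (show ¬ (['S','E','A','R','C','H'] : List Char) = p1 from hps)]
                                                                rfl
                                                              rw [if_neg (by simp; exact hps : ¬ (("COMPOSIO".toList == "COMPOSIO".toList && "SEARCH".toList == p1) = true))]
                                                              simp only [resolve2]
                                                              rw [hg2]
                                                              simp only [mkAction]
                                                              rw [← hjoin]
                                                              rw [action1 ("COMPOSIO".toList) ((p1 :: p2 :: rest2)) hq1 (by simp) (("COMPOSIO_".toList).length) (by decide)]
                                                              rfl
                                                            · -- COMPOSIO_ does not match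
                                                              rw [if_neg hc1]
                                                              rw [if_neg hc2]
                                                              rw [if_neg hc3]
                                                              rw [if_neg hc4]
                                                              rw [if_neg hc5]
                                                              rw [if_neg hc6]
                                                              rw [if_neg hc7]
                                                              rw [if_neg hc8]
                                                              rw [if_neg hc9]
                                                              rw [if_neg hc10]
                                                              rw [if_neg hc11]
                                                              rw [if_neg hc12]
                                                              rw [if_neg hc13]
                                                              rw [if_neg hc14]
                                                              rw [if_neg hc15]
                                                              rw [if_neg hc16]
                                                              rw [if_neg hc17]
                                                              rw [if_neg hc18]
                                                              rw [if_neg hc19]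
                                                              rw [if_neg hc20]
                                                              rw [if_neg hc21]
                                                              rw [if_neg hc22]
                                                              rw [if_neg hc23]
                                                              rw [if_neg hc24]
                                                              rw [if_neg hc25]
                                                              rw [if_neg hc26]
                                                              rw [if_neg hc27]
                                                              have m1 : ¬ ((("MICROSOFT".toList, "TEAMS".toList) == (p0, p1)) = true) := by
                                                                intro hx
                                                                injection eq_of_beq hx with hA hB
                                                                exact hc1 (by rw [← hA, ← hB]; simp)
                                                              have m4 : ¬ ((("ONE".toList, "DRIVE".toList) == (p0, p1)) = true) := by
                                                                intro hx
                                                                injection eq_of_beq hx with hA hB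
                                                                exact hc4 (by rw [← hA, ← hB]; simp)
                                                              have m6 : ¬ ((("GOOGLE".toList, "SHEETS".toList) == (p0, p1)) = true) := by
                                                                intro hx
                                                                injection eq_of_beq hx with hA hB
                                                                exact hc6 (by rw [← hA, ← hB]; simp)
                                                              have m8 : ¬ ((("GOOGLE".toList, "DOCS".toList) == (p0, p1)) = true) := by
                                                                intro hx
                                                                injection eq_of_beq hx with hA hB
                                                                exact hc8 (by rw [← hA, ← hB]; simp)
                                                              have m11 : ¬ ((("GOOGLE".toList, "CALENDAR".toList) == (p0, p1)) = true) := by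
                                                                intro hx
                                                                injection eq_of_beq hx with hA hB
                                                                exact hc11 (by rw [← hA, ← hB]; simp)
                                                              have m13 : ¬ ((("GOOGLE".toList, "DRIVE".toList) == (p0, p1)) = true) := by
                                                                intro hx
                                                                injection eq_of_beq hx with hA hB
                                                                exact hc13 (by rw [← hA, ← hB]; simp)
                                                              have m26 : ¬ ((("COMPOSIO".toList, "SEARCH".toList) == (p0, p1)) = true) := by
                                                                intro hx
                                                                injection eq_of_beq hx with hA hB
                                                                exact hc26 (by rw [← hA, ← hB]; simp)
                                                              have hfb : slugFallback slug = (String.ofList (pyTitle false p0), String.ofList (pyTitle false (PySem.Chars.join [' '] (p1 :: p2 :: rest2)))) := by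
                                                                unfold slugFallback
                                                                rw [splitOnMax_one, hpp]
                                                                simp [replace_eq_map, map_subU_join _ hq1]
                                                              rw [hfb]
                                                              simp only [resolve2, twoTokenLabels, oneTokenLabels, PySem.Dict.get?_mk_cons]
                                                              rw [if_neg m1, if_neg m4, if_neg m6, if_neg m8, if_neg m11, if_neg m13, if_neg m26, if_neg hc2, if_neg hc3, if_neg hc5, if_neg hc7, if_neg hc9, if_neg hc10, if_neg hc12, if_neg hc14, if_neg hc15, if_neg hc16, if_neg hc17, if_neg hc18, if_neg hc19, if_neg hc20, if_neg hc21, if_neg hc22, if_neg hc23, if_neg hc24, if_neg hc25, if_neg hc27]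
                                                              simp only [Option.map, List.drop_succ_cons, List.drop_zero, PySem.Chars.join_singleton, titleB_eq, List.headD_cons]
                                                              rfl
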